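-- pv_equiv track=rewrite | github.com/ManuBruzzone/PP_PROGRAMACION_I_311_Bruzzone | Package_Input/Validate.py | validate_grupo_sanguineo
-- ===== SOURCE A (Python) =====
-- def validate_grupo_sanguineo(cadena: str) -> bool:
--     """Valida que una cadena corresponda a un grupo sanguineo valido.
--
--     Args:
--         cadena (str): La cadena de texto a validar.
--
--     Returns:
--         bool: True si la cadena corresponde a un grupo sanguineo válido, False en caso contrario.
--     """
--     validacion = False
--
--     puestos_validos = {'A+', 'A-', 'B+', 'B-', 'AB+', 'AB-', '0+', '0-'}
--     for puesto in puestos_validos: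
--         if cadena == puesto:
--             validacion = True
--             break
--
--     return validacion
-- ===== SOURCE B (Python) =====
-- def validate_grupo_sanguineo(cadena: str) -> bool:
--     """Valida que una cadena corresponda a un grupo sanguineo valido."""
--     if not cadena:
--         return False
--     return cadena[:-1] in ('A', 'B', 'AB', '0') and cadena[-1] in ('+', '-')
-- ===== Notes on version B (the rewrite author's own statement) =====
-- stated objective: idiomatic
-- what changed: B validates the ABO-group prefix and the Rh-sign last character as two independent component checks instead of comparing the whole string against eight enumerated literals.
import Mathlib
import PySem

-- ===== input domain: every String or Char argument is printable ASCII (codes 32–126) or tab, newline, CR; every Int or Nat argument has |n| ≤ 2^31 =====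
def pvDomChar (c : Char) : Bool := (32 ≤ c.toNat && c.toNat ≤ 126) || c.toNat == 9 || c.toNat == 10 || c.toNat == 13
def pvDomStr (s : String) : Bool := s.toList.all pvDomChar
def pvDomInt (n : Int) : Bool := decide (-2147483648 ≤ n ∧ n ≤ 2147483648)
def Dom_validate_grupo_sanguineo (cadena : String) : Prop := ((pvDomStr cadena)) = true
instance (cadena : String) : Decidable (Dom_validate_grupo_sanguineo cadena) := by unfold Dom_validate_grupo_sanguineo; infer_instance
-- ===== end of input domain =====

-- B validates the two components (ABO prefix, Rh sign) separately instead of A's loop over eight enumerated literals; same result on every string (idiomatic decomposition, not faster).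

-- ===== PORT A =====
-- the set literal of the eight valid strings (a PySem.Set IS its distinct-element list);
-- the loop's break-on-first-hit makes the result independent of the set's iteration order
def validate_grupo_sanguineo (cadena : String) : Bool :=
  let puestos_validos : PySem.Set String :=
    PySem.Set.ofList ["A+", "A-", "B+", "B-", "AB+", "AB-", "0+", "0-"]
  -- for puesto in puestos_validos: if cadena == puesto: validacion = True; break
  puestos_validos.foldl
    (fun validacion puesto => if validacion then validacion else cadena == puesto) false

-- ===== PORT B =====
def validate_grupo_sanguineo_alt (cadena : String) : Bool :=
  let cs := cadena.toList
  if cs = [] then false   -- if not cadena: return False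
  else
    -- cadena[:-1] in ('A', 'B', 'AB', '0')
    decide (PySem.List.slice cs none (some (-1)) ∈ [['A'], ['B'], ['A', 'B'], ['0']]) &&
    -- cadena[-1] in ('+', '-')   (cs ≠ [] so the index is in range)
    (match PySem.List.pyGet? cs (-1) with
     | some c => decide (c ∈ ['+', '-'])
     | none => false)

-- ===== PRECONDITION & SPEC =====
def Spec_validate_grupo_sanguineo (cadena : String) (out : Bool) : Prop := out = validate_grupo_sanguineo_alt cadena
instance (cadena : String) (out : Bool) : Decidable (Spec_validate_grupo_sanguineo cadena out) := by unfold Spec_validate_grupo_sanguineo; infer_instance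

-- ===== CLAIM (what is proved, stated in full; the proofs are below) =====
def Claim_equal_validate_grupo_sanguineo : Prop := ∀ (cadena : String), Dom_validate_grupo_sanguineo cadena → Spec_validate_grupo_sanguineo cadena (validate_grupo_sanguineo cadena)

-- ===== LEMMAS AND PROOFS =====

-- the membership loop with break is membership
theorem foldl_break_eq_any (cadena : String) (l : List String) (b : Bool) :
    l.foldl (fun v p => if v then v else cadena == p) b
      = (b || l.any (fun p => cadena == p)) := by
  induction l generalizing b with
  | nil => simp
  | cons x xs ih => cases b <;> simp [List.foldl, ih]

-- A returns true exactly on the eight literal strings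
theorem portA_eq_mem (cadena : String) :
    validate_grupo_sanguineo cadena =
      decide (cadena ∈ (["A+", "A-", "B+", "B-", "AB+", "AB-", "0+", "0-"] : List String)) := by
  unfold validate_grupo_sanguineo
  rw [show PySem.Set.ofList (["A+", "A-", "B+", "B-", "AB+", "AB-", "0+", "0-"] : List String)
        = (["A+", "A-", "B+", "B-", "AB+", "AB-", "0+", "0-"] : List String) from by decide]
  rw [foldl_break_eq_any]
  rw [Bool.eq_iff_iff]
  simp

-- component form of B, over the character list
theorem portB_eq_components (cadena : String) :
    validate_grupo_sanguineo_alt cadena =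
      decide (cadena.toList ≠ [] ∧
        cadena.toList.dropLast ∈ ([['A'], ['B'], ['A', 'B'], ['0']] : List (List Char)) ∧
        ∃ c, cadena.toList.getLast? = some c ∧ c ∈ (['+', '-'] : List Char)) := by
  unfold validate_grupo_sanguineo_alt
  by_cases h : cadena.toList = []
  · simp [h]
  · simp [h, PySem.List.slice_to_neg_one, PySem.List.pyGet?_neg_one]
    rcases hl : cadena.toList.getLast? with _ | c
    · rw [List.getLast?_eq_none_iff] at hl; exact absurd hl h
    · simp

-- the eight literals are exactly the 4×2 cross product of components
theorem mem_iff_components (cs : List Char) :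
    cs ∈ (["A+", "A-", "B+", "B-", "AB+", "AB-", "0+", "0-"] : List String).map String.toList ↔
      cs ≠ [] ∧
        cs.dropLast ∈ ([['A'], ['B'], ['A', 'B'], ['0']] : List (List Char)) ∧
        ∃ c, cs.getLast? = some c ∧ c ∈ (['+', '-'] : List Char) := by
  constructor
  · intro h
    simp at h
    rcases h with h | h | h | h | h | h | h | h <;> subst h <;> refine ⟨by decide, by decide, ?_⟩ <;>
      first
        | exact ⟨'+', by decide, by decide⟩
        | exact ⟨'-', by decide, by decide⟩
  · rintro ⟨hne, hgrp, c, hlast, hsign⟩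
    have hcs : cs = cs.dropLast ++ [c] := by
      have hd := List.dropLast_append_getLast hne
      rw [List.getLast?_eq_some_getLast hne] at hlast
      rw [Option.some.inj hlast] at hd
      exact hd.symm
    rw [hcs]
    simp at hgrp hsign ⊢
    rcases hgrp with h | h | h | h <;> rcases hsign with h' | h' <;> simp [h, h']

-- ===== VERDICT (by name: the statement is the Claim_ definition above) =====
theorem validate_grupo_sanguineo_spec : Claim_equal_validate_grupo_sanguineo := by
  intro cadena _
  unfold Spec_validate_grupo_sanguineo
  rw [portA_eq_mem, portB_eq_components]
  congr 1
  rw [eq_iff_iff, ← mem_iff_components cadena.toList]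
  constructor
  · intro hm
    exact List.mem_map_of_mem hm
  · intro hc
    rcases List.mem_map.mp hc with ⟨s, hs, hst⟩
    rwa [← String.toList_inj.mp hst]
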